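-- pv_equiv track=rewrite | github.com/z-ng/Artificial-Intelligence | Cryptogram/cryptogram.py | buildDctFrequency
-- ===== SOURCE A (Python) =====
-- def buildDctFrequency(dct):
--     encodedDict = {}
--     for word in dct:
--         frequencyInWord = {}
--         count = 0
--         for letter in word:
--             if letter not in frequencyInWord:
--                 frequencyInWord[letter] = count
--                 if isinstance(count, str):
--                     count = chr(ord(count)+1)
--                 elif count > 9:
--                     count = "A"
--                 else:
--                     count+=1
--         encodedString = ""
--         for letter in word:
--             encodedString = encodedString+str(frequencyInWord[letter])
--         if encodedString not in encodedDict.keys():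
--             encodedDict[encodedString] = [word]
--         else:
--             encodedDict[encodedString].append(word.lower())
--     return encodedDict
-- ===== SOURCE B (Python) =====
-- def _code(r):
--     return str(r) if r <= 10 else chr(54 + r)
--
--
-- def _signature(word):
--     # rank of a letter = how many distinct letters occur before its first occurrence
--     return "".join(_code(len(set(word[:word.index(c)]))) for c in word)
--
--
-- def buildDctFrequency(dct):
--     sigs = [_signature(w) for w in dct]
--     out = {}
--     for s in dict.fromkeys(sigs):
--         words = [w for t, w in zip(sigs, dct) if t == s]
--         out[s] = words[:1] + [w.lower() for w in words[1:]]
--     return out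
-- ===== Notes on version B (the rewrite author's own statement) =====
-- stated objective: alternative
-- what changed: The signature is computed without A's mixed int/str counter state machine: each letter's rank is the cardinality of the set of the prefix before its first occurrence, encoded by a closed-form rank-to-code function; grouping is staged instead of incremental: all signatures are computed first, then for each distinct signature one scan over the zipped list collects its bucket (first word as-is, later ones lowercased), so no dict is grown word by word.
import Mathlib
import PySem

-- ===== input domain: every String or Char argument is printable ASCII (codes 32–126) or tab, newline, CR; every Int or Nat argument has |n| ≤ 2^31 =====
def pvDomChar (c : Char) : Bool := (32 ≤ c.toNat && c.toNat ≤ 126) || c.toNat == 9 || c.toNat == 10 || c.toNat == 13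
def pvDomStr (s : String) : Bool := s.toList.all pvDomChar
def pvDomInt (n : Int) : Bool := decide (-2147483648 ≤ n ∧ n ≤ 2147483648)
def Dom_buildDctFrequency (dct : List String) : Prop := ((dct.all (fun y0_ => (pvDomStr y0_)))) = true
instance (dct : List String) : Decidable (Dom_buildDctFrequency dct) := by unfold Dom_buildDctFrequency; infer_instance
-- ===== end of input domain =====

-- B replaces A's incremental dict building and mixed int/str counter by a staged pipeline:
-- ranks come from set-cardinalities of first-occurrence prefixes, buckets from one scan per
-- distinct signature over the precomputed (signature, word) list; objective: alternative.

-- ===== PORT A =====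
-- A's 'count' is an int until it passes 9 and a ONE-character string afterwards;
-- we model that value as 'Sum Int Char' (the string side is always one character in A).
def pvNextCnt (c : Sum Int Char) : Sum Int Char :=
  match c with
  | .inr ch => .inr (Char.ofNat (ch.toNat + 1))          -- count = chr(ord(count)+1)
  | .inl n => if n > 9 then .inr 'A' else .inl (n + 1)   -- count = "A" / count += 1

def pvStrCnt (c : Sum Int Char) : String :=              -- str(frequencyInWord[letter])
  match c with
  | .inl n => PySem.Int.toStr n
  | .inr ch => String.ofList [ch]

def pvStepA (st : PySem.Dict Char (Sum Int Char) × Sum Int Char) (letter : Char) :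
    PySem.Dict Char (Sum Int Char) × Sum Int Char :=
  if st.1.contains letter then st
  else (st.1.insert letter st.2, pvNextCnt st.2)

def pvEncodeA (w : List Char) : String :=
  let frequencyInWord := (w.foldl pvStepA (PySem.Dict.empty, Sum.inl 0)).1
  -- frequencyInWord[letter]: the key is always present (every letter of w was inserted
  -- by the first loop), so getD's default is never consulted
  w.foldl (fun s letter => s ++ pvStrCnt (frequencyInWord.getD letter (Sum.inl 0))) ""

def buildDctFrequency (dct : List String) : List (String × List String) :=
  (dct.foldl (fun encodedDict word =>
      let encodedString := pvEncodeA word.toList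
      if encodedDict.contains encodedString = false then
        encodedDict.insert encodedString [word]
      else
        encodedDict.modify encodedString [] (fun l => l ++ [PySem.Str.lower word]))
    PySem.Dict.empty).items

-- ===== PORT B =====
def pvCode (r : Int) : String :=                         -- str(r) if r <= 10 else chr(54 + r)
  if r ≤ 10 then PySem.Int.toStr r else String.ofList [Char.ofNat (54 + r).toNat]

-- rank of c = len(set(word[:word.index(c)])); c is drawn from word, so index() never raises
def pvSigB (w : List Char) : String :=
  PySem.Str.join "" (w.map (fun c =>
    pvCode ((PySem.Set.ofList
      (PySem.List.slice w none (some (((PySem.List.index? w c).getD 0 : Nat) : Int)))).length)))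

def buildDctFrequency_alt (dct : List String) : List (String × List String) :=
  let sigs := dct.map (fun w => pvSigB w.toList)
  ((PySem.List.dedup sigs).foldl (fun out s =>
      let words := ((sigs.zip dct).filter (fun p => p.1 == s)).map Prod.snd
      -- words[:1] + [w.lower() for w in words[1:]]
      out.insert s (words.take 1 ++ (words.drop 1).map PySem.Str.lower))
    PySem.Dict.empty).items

-- ===== PRECONDITION & SPEC =====
def Spec_buildDctFrequency (dct : List String) (out : List (String × List String)) : Prop := out = buildDctFrequency_alt dct
instance (dct : List String) (out : List (String × List String)) : Decidable (Spec_buildDctFrequency dct out) := by unfold Spec_buildDctFrequency; infer_instance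

-- ===== CLAIM (what is proved, stated in full; the proofs are below) =====
def Claim_equal_buildDctFrequency : Prop := ∀ (dct : List String), Dom_buildDctFrequency dct → Spec_buildDctFrequency dct (buildDctFrequency dct)

-- ===== LEMMAS AND PROOFS =====

-- the value A's counter holds after n distinct letters have been seen
def pvEncCnt (n : Nat) : Sum Int Char :=
  if n ≤ 10 then Sum.inl (n : Int) else Sum.inr (Char.ofNat (54 + n))

lemma pvNext_enc (n : Nat) (h : n ≤ 130) : pvNextCnt (pvEncCnt n) = pvEncCnt (n + 1) := by
  unfold pvNextCnt pvEncCnt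
  rcases Nat.lt_or_ge n 10 with h10 | h10
  · simp only [if_pos (by omega : n ≤ 10), if_pos (by omega : n + 1 ≤ 10)]
    simp only [if_neg (by omega : ¬ ((n : Int) > 9))]
    norm_num
  · rcases Nat.eq_or_lt_of_le h10 with h11 | h11
    · subst_vars
      decide
    · simp only [if_neg (by omega : ¬ n ≤ 10), if_neg (by omega : ¬ n + 1 ≤ 10)]
      have hv : (Char.ofNat (54 + n)).toNat = 54 + n := by
        rw [Char.toNat_ofNat, if_pos (Or.inl (by omega))]
      rw [hv, Nat.add_assoc]

lemma pvLenBound (s : List Char) (hd : ∀ c ∈ s, pvDomChar c = true) (hn : s.Nodup) :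
    s.length ≤ 130 := by
  have hsub : s ⊆ (List.range 128).map Char.ofNat := by
    intro c hc
    have hdc := hd c hc
    have hlt : c.toNat < 128 := by
      simp only [pvDomChar, Bool.or_eq_true, Bool.and_eq_true, decide_eq_true_eq, beq_iff_eq] at hdc
      omega
    exact List.mem_map.mpr ⟨c.toNat, List.mem_range.mpr hlt, Char.ofNat_toNat c⟩
  have := (hn.subperm hsub).length_le
  simp at this
  omega

-- invariant of A's first loop: the dict maps each seen letter to the encoded counter
-- value of its first-occurrence rank, and the counter encodes the number seen so far
lemma pvInnerA (rest : List Char) : ∀ (s : List Char) (d : PySem.Dict Char (Sum Int Char)),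
    (∀ c ∈ s ++ rest, pvDomChar c = true) → s.Nodup → d.keys = s →
    (∀ c ∈ s, d.getD c (Sum.inl 0) = pvEncCnt (s.idxOf c)) →
    ∀ c ∈ s ++ rest,
      (rest.foldl pvStepA (d, pvEncCnt s.length)).1.getD c (Sum.inl 0)
        = pvEncCnt ((rest.foldl PySem.Set.add s).idxOf c) := by
  induction rest with
  | nil =>
    intro s d _ _ _ hget c hc
    simpa using hget c (by simpa using hc)
  | cons x rest ih =>
    intro s d hdom hnd hkeys hget c hc
    have hcont : d.contains x = decide (x ∈ s) := by
      rw [PySem.Dict.contains_eq_decide_mem_keys, hkeys]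
    by_cases hx : x ∈ s
    · have hstep : pvStepA (d, pvEncCnt s.length) x = (d, pvEncCnt s.length) := by
        simp [pvStepA, hcont, hx]
      have hadd : PySem.Set.add s x = s := by
        simp [PySem.Set.add, hx]
      simp only [List.foldl_cons, hstep, hadd]
      refine ih s d ?_ hnd hkeys hget c ?_
      · intro c' hc'
        exact hdom c' (by simp at hc' ⊢; tauto)
      · simp at hc ⊢
        rcases hc with h | h | h
        · exact Or.inl h
        · exact Or.inl (h ▸ hx)
        · exact Or.inr h
    · have hstep : pvStepA (d, pvEncCnt s.length) x
          = (d.insert x (pvEncCnt s.length), pvNextCnt (pvEncCnt s.length)) := by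
        simp [pvStepA, hcont, hx]
      have hadd : PySem.Set.add s x = s ++ [x] := by
        simp [PySem.Set.add, hx]
      have hlen : s.length ≤ 130 :=
        pvLenBound s (fun c' hc' => hdom c' (by simp [hc'])) hnd
      have hcnt : pvNextCnt (pvEncCnt s.length) = pvEncCnt (s ++ [x]).length := by
        rw [pvNext_enc s.length hlen]; simp
      have hkeys' : (d.insert x (pvEncCnt s.length)).keys = s ++ [x] := by
        rw [PySem.Dict.keys_insert_of_not_contains d _ (by simp [hcont, hx]), hkeys]
      have hget' : ∀ c' ∈ s ++ [x],
          (d.insert x (pvEncCnt s.length)).getD c' (Sum.inl 0)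
            = pvEncCnt ((s ++ [x]).idxOf c') := by
        intro c' hc'
        rw [PySem.Dict.getD_insert]
        rcases (by simpa using hc' : c' ∈ s ∨ c' = x) with hmem | rfl
        · have hne : c' ≠ x := fun h => hx (h ▸ hmem)
          rw [if_neg hne, hget c' hmem, List.idxOf_append_of_mem hmem]
        · rw [if_pos rfl]
          congr 1
          simp [List.idxOf_append, hx]
      have hnd' : (s ++ [x]).Nodup := by
        simp [List.nodup_append, hnd]
        exact fun a ha h => hx (h ▸ ha)
      have hdom' : ∀ c' ∈ (s ++ [x]) ++ rest, pvDomChar c' = true := by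
        intro c' hc'
        apply hdom c'
        simp only [List.mem_append, List.mem_cons] at hc' ⊢
        tauto
      simp only [List.foldl_cons, hstep, hadd, hcnt]
      refine ih (s ++ [x]) _ hdom' hnd' hkeys' hget' c ?_
      simp only [List.mem_append, List.mem_cons] at hc ⊢
      tauto

-- one-character codes agree: str() of A's stored counter value is B's code of the rank
lemma pvStr_enc_code (k : Nat) : pvStrCnt (pvEncCnt k) = pvCode (k : Int) := by
  unfold pvStrCnt pvEncCnt pvCode
  by_cases hk : k ≤ 10
  · rw [if_pos hk, if_pos (by exact_mod_cast hk)]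
  · rw [if_neg hk, if_neg (by omega)]
    congr 2

-- a loop appending strings is the join of the mapped pieces
lemma pvFoldStr (f : Char → String) (w : List Char) (acc : String) :
    w.foldl (fun s c => s ++ f c) acc = acc ++ PySem.Str.join "" (w.map f) := by
  induction w generalizing acc with
  | nil => simp [PySem.Str.join, PySem.Chars.join_nil]
  | cons x t ih =>
    rw [List.foldl_cons, ih, List.map_cons, String.append_assoc]
    congr 1
    apply String.toList_inj.mp
    rw [String.toList_append, PySem.Str.toList_join, PySem.Str.toList_join]
    cases ht : t.map f with
    | nil => simp [PySem.Chars.join_nil, PySem.Chars.join_singleton]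
    | cons y r =>
      simp only [List.map_cons]
      have he : ("" : String).toList = [] := rfl
      rw [he, PySem.Chars.join_cons_cons]
      simp

lemma pvEncodeA_eq (w : List Char) (hdom : ∀ c ∈ w, pvDomChar c = true) :
    pvEncodeA w
      = PySem.Str.join "" (w.map fun c => pvStrCnt (pvEncCnt ((PySem.List.dedup w).idxOf c))) := by
  unfold pvEncodeA
  have hinv := pvInnerA w [] PySem.Dict.empty (by simpa using hdom) List.nodup_nil
    PySem.Dict.keys_empty (by simp)
  have h0 : pvEncCnt ([] : List Char).length = Sum.inl 0 := rfl
  rw [PySem.List.foldl_congr_mem w _ (fun s c => s ++ pvStrCnt (pvEncCnt ((PySem.List.dedup w).idxOf c))) ""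
      (fun acc c hc => by
        have := hinv c (by simpa using hc)
        rw [h0] at this
        rw [this]
        rfl)]
  rw [pvFoldStr]
  simp

-- folding Set.add only ever appends: the start list stays a prefix
lemma pvAddPrefix (t : List Char) : ∀ (s : List Char), ∃ r, t.foldl PySem.Set.add s = s ++ r := by
  induction t with
  | nil => exact fun s => ⟨[], by simp⟩
  | cons x tl ih =>
    intro s
    have h1 : ∃ r0, PySem.Set.add s x = s ++ r0 := by
      by_cases hx : x ∈ s
      · exact ⟨[], by simp [PySem.Set.add, hx]⟩
      · exact ⟨[x], by simp [PySem.Set.add, hx]⟩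
    obtain ⟨r0, hr0⟩ := h1
    obtain ⟨r, hr⟩ := ih (PySem.Set.add s x)
    exact ⟨r0 ++ r, by rw [List.foldl_cons, hr, hr0, List.append_assoc]⟩

-- first-occurrence rank in the dedup list = size of the distinct set of the prefix
-- before the first occurrence
lemma pvRankAux (t : List Char) : ∀ (s : List Char) (c : Char), c ∈ t → c ∉ s →
    (t.foldl PySem.Set.add s).idxOf c = ((t.take (t.idxOf c)).foldl PySem.Set.add s).length := by
  induction t with
  | nil => intro s c hc; cases hc
  | cons a tl ih =>
    intro s c hc hcs
    by_cases hac : c = a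
    · subst hac
      rw [List.idxOf_cons_self]
      simp only [List.take_zero, List.foldl_nil]
      have hadd : PySem.Set.add s c = s ++ [c] := by simp [PySem.Set.add, hcs]
      obtain ⟨r, hr⟩ := pvAddPrefix tl (s ++ [c])
      rw [List.foldl_cons, hadd, hr]
      rw [List.idxOf_append_of_mem (by simp)]
      simp [List.idxOf_append, hcs]
    · have hct : c ∈ tl := by
        rcases List.mem_cons.mp hc with h | h
        · exact absurd h hac
        · exact h
      have hane : a ≠ c := fun h => hac h.symm
      rw [List.idxOf_cons_ne _ hane]
      simp only [List.take_succ_cons, List.foldl_cons]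
      refine ih (PySem.Set.add s a) c hct ?_
      intro hmem
      by_cases ha : a ∈ s
      · rw [show PySem.Set.add s a = s from by simp [PySem.Set.add, ha]] at hmem
        exact hcs hmem
      · rw [show PySem.Set.add s a = s ++ [a] from by simp [PySem.Set.add, ha]] at hmem
        rcases List.mem_append.mp hmem with h | h
        · exact hcs h
        · exact hac (by simpa using h)

lemma pvRank (w : List Char) (c : Char) (hc : c ∈ w) :
    (PySem.Set.ofList (w.take (w.idxOf c))).length = (PySem.List.dedup w).idxOf c := by
  rw [PySem.List.dedup_eq_ofList, PySem.Set.ofList_eq_foldl, PySem.Set.ofList_eq_foldl]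
  exact (pvRankAux w [] c hc (by simp)).symm

lemma pvIdxOf? (w : List Char) (c : Char) (h : c ∈ w) : List.idxOf? c w = some (w.idxOf c) := by
  induction w with
  | nil => cases h
  | cons a t ih =>
    by_cases hca : a = c
    · simp [List.idxOf?_cons, hca]
    · have hct : c ∈ t := by
        rcases List.mem_cons.mp h with h' | h'
        · exact absurd h'.symm hca
        · exact h'
      simp [List.idxOf?_cons, hca, ih hct]

-- the two signature computations agree letter by letter
lemma pvSig_eq (w : List Char) (hdom : ∀ c ∈ w, pvDomChar c = true) :
    pvEncodeA w = pvSigB w := by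
  rw [pvEncodeA_eq w hdom]
  unfold pvSigB
  congr 1
  apply List.map_congr_left
  intro c hc
  have hidx : PySem.List.index? w c = some (w.idxOf c) := by
    rw [PySem.List.index?_eq_idxOf?]
    exact pvIdxOf? w c hc
  rw [hidx]
  simp only [Option.getD_some]
  rw [PySem.List.slice_to_natCast, pvRank w c hc]
  exact pvStr_enc_code _

-- A's per-word dict update, over precomputed (signature, word) pairs
def pvStepP (d : PySem.Dict String (List String)) (p : String × String) :
    PySem.Dict String (List String) :=
  if d.contains p.1 = false then d.insert p.1 [p.2]
  else d.modify p.1 [] (fun l => l ++ [PySem.Str.lower p.2])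

def pvBucket (ws : List String) : List String :=
  ws.take 1 ++ (ws.drop 1).map PySem.Str.lower

lemma pvStepP_keys (d : PySem.Dict String (List String)) (p : String × String) :
    (pvStepP d p).keys = PySem.Set.add d.keys p.1 := by
  unfold pvStepP
  by_cases hc : d.contains p.1 = false
  · rw [if_pos hc, PySem.Dict.keys_insert_of_not_contains d _ hc]
    have hm : p.1 ∉ d.keys := by
      intro h
      rw [PySem.Dict.contains_eq_decide_mem_keys, decide_eq_true h] at hc
      exact absurd hc (by simp)
    simp [PySem.Set.add, hm]
  · have hc' : d.contains p.1 = true := by simpa using hc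
    rw [if_neg hc, PySem.Dict.keys_modify, PySem.Dict.keys_insert_of_contains d _ hc']
    have hm : p.1 ∈ d.keys := by
      rw [PySem.Dict.contains_eq_decide_mem_keys] at hc'
      simpa using hc'
    simp [PySem.Set.add, hm]

lemma pvFoldP_keys (ps : List (String × String)) :
    ∀ (d : PySem.Dict String (List String)),
      (ps.foldl pvStepP d).keys = (ps.map Prod.fst).foldl PySem.Set.add d.keys := by
  induction ps with
  | nil => intro d; rfl
  | cons p tl ih =>
    intro d
    rw [List.map_cons, List.foldl_cons, List.foldl_cons, ← pvStepP_keys]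
    exact ih _

lemma pvStepP_nodup (d : PySem.Dict String (List String)) (p : String × String)
    (h : d.keys.Nodup) : (pvStepP d p).keys.Nodup := by
  unfold pvStepP
  by_cases hc : d.contains p.1 = false
  · rw [if_pos hc]; exact PySem.Dict.nodup_keys_insert d _ _ h
  · have hc' : d.contains p.1 = true := by simpa using hc
    rw [if_neg hc, PySem.Dict.keys_modify, PySem.Dict.keys_insert_of_contains d _ hc']
    exact h

lemma pvFoldP_nodup (ps : List (String × String)) :
    ∀ (d : PySem.Dict String (List String)), d.keys.Nodup → (ps.foldl pvStepP d).keys.Nodup := by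
  induction ps with
  | nil => exact fun d h => h
  | cons p tl ih => exact fun d h => ih _ (pvStepP_nodup d p h)

-- the bucket A accumulates for signature s: what was already there plus the matching
-- words, the first one raw if s was fresh, all later ones lowercased
lemma pvFoldP_getD (ps : List (String × String)) :
    ∀ (d : PySem.Dict String (List String)) (s : String),
      (ps.foldl pvStepP d).getD s [] =
        if d.contains s = true then
          d.getD s [] ++ ((ps.filter (fun p => p.1 == s)).map Prod.snd).map PySem.Str.lower
        else pvBucket ((ps.filter (fun p => p.1 == s)).map Prod.snd) := by
  induction ps with
  | nil =>
    intro d s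
    by_cases hc : d.contains s = true
    · simp [hc]
    · have hh := PySem.Dict.getD_of_not_contains d ([] : List String)
        (show d.contains s = false by simpa using hc)
      rw [List.foldl_nil, if_neg hc]
      simp [pvBucket, hh]
  | cons p tl ih =>
    intro d s
    rw [List.foldl_cons]
    by_cases hks : p.1 = s
    · have hfil : List.filter (fun q => q.1 == s) (p :: tl) = p :: List.filter (fun q => q.1 == s) tl := by
        rw [List.filter_cons, if_pos (by simp [hks])]
      rw [hfil]
      by_cases hc : d.contains s = true
      · have hstep : pvStepP d p = d.modify s [] (fun l => l ++ [PySem.Str.lower p.2]) := by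
          unfold pvStepP; rw [hks, if_neg (by simp [hc])]
        have hc' : (d.modify s [] (fun l => l ++ [PySem.Str.lower p.2])).contains s = true := by
          rw [PySem.Dict.contains_modify]; simp
        rw [hstep, ih, if_pos hc, if_pos hc', PySem.Dict.getD_modify_self]
        simp
      · have hstep : pvStepP d p = d.insert s [p.2] := by
          unfold pvStepP; rw [hks, if_pos (by simpa using hc)]
        rw [hstep, ih, if_neg hc,
          if_pos (PySem.Dict.contains_insert_self d s [p.2]), PySem.Dict.getD_insert_self]
        simp [pvBucket]
    · have hfil : List.filter (fun q => q.1 == s) (p :: tl) = List.filter (fun q => q.1 == s) tl := by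
        rw [List.filter_cons, if_neg (by simp [hks])]
      rw [hfil]
      have hcont : (pvStepP d p).contains s = d.contains s := by
        unfold pvStepP
        by_cases hc : d.contains p.1 = false
        · rw [if_pos hc, PySem.Dict.contains_insert]
          simp [show ¬ (s = p.1) from fun h => hks h.symm]
        · rw [if_neg hc, PySem.Dict.contains_modify]
          simp [show ¬ (s = p.1) from fun h => hks h.symm]
      have hgetD : (pvStepP d p).getD s [] = d.getD s [] := by
        unfold pvStepP
        by_cases hc : d.contains p.1 = false
        · rw [if_pos hc, PySem.Dict.getD_insert, if_neg (fun h => hks h.symm)]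
        · rw [if_neg hc, PySem.Dict.getD_modify, if_neg (fun h => hks h.symm)]
      rw [ih, hcont, hgetD]

-- ===== VERDICT (by name: the statement is the Claim_ definition above) =====
theorem buildDctFrequency_spec : Claim_equal_buildDctFrequency := by
  intro dct hdom
  unfold Spec_buildDctFrequency buildDctFrequency buildDctFrequency_alt
  have hwordDom : ∀ w ∈ dct, ∀ c ∈ w.toList, pvDomChar c = true := by
    intro w hw c hc
    have hws : pvDomStr w = true := (List.all_eq_true.mp hdom) w hw
    exact (List.all_eq_true.mp hws) c hc
  -- both signature lists are the same
  have hsig : dct.map (fun w => pvSigB w.toList) = dct.map (fun w => pvEncodeA w.toList) :=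
    List.map_congr_left (fun w hw => (pvSig_eq w.toList (hwordDom w hw)).symm)
  set sigs := dct.map (fun w => pvEncodeA w.toList) with hsigs
  set ps := dct.map (fun w => (pvEncodeA w.toList, w)) with hps
  -- A's fold over words is the pair fold
  have hAfold : (dct.foldl (fun encodedDict word =>
      let encodedString := pvEncodeA word.toList
      if encodedDict.contains encodedString = false then
        encodedDict.insert encodedString [word]
      else
        encodedDict.modify encodedString [] (fun l => l ++ [PySem.Str.lower word]))
      PySem.Dict.empty) = ps.foldl pvStepP PySem.Dict.empty := by
    rw [hps, List.foldl_map]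
    rfl
  rw [hAfold, hsig]
  -- ps projections
  have hfst : ps.map Prod.fst = sigs := by
    rw [hps, hsigs, List.map_map]; rfl
  have hzip : sigs.zip dct = ps := by
    have h : (dct.map (fun w => pvEncodeA w.toList)).zip (dct.map id)
        = dct.map (fun w => (pvEncodeA w.toList, id w)) := List.zip_map'
    simp only [List.map_id, id_eq] at h
    rw [hsigs, hps, h]
  -- A's items, via keys/getD
  have hnd : (ps.foldl pvStepP PySem.Dict.empty).keys.Nodup :=
    pvFoldP_nodup ps PySem.Dict.empty (by simp)
  have hkeys : (ps.foldl pvStepP PySem.Dict.empty).keys = PySem.List.dedup sigs := by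
    rw [pvFoldP_keys, PySem.Dict.keys_empty, hfst,
      PySem.List.dedup_eq_ofList, PySem.Set.ofList_eq_foldl]
  rw [PySem.Dict.items_eq_map_keys _ hnd [], hkeys]
  -- B's items: a fresh-key insert loop appends
  have hBitems :
      ((PySem.List.dedup sigs).foldl (fun out s =>
          out.insert s ((((sigs.zip dct).filter (fun p => p.1 == s)).map Prod.snd).take 1 ++
            ((((sigs.zip dct).filter (fun p => p.1 == s)).map Prod.snd).drop 1).map PySem.Str.lower))
        PySem.Dict.empty).items =
      (PySem.List.dedup sigs).map (fun s =>
        (s, (((sigs.zip dct).filter (fun p => p.1 == s)).map Prod.snd).take 1 ++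
          ((((sigs.zip dct).filter (fun p => p.1 == s)).map Prod.snd).drop 1).map PySem.Str.lower)) := by
    have h := PySem.Dict.items_foldl_insert_fresh (PySem.List.dedup sigs)
      (fun s => s)
      (fun s => (((sigs.zip dct).filter (fun p => p.1 == s)).map Prod.snd).take 1 ++
        ((((sigs.zip dct).filter (fun p => p.1 == s)).map Prod.snd).drop 1).map PySem.Str.lower)
      PySem.Dict.empty
      (fun a _ => PySem.Dict.contains_empty _)
      (by simp)
    simpa using h
  rw [hBitems]
  apply List.map_congr_left
  intro s _
  rw [pvFoldP_getD ps PySem.Dict.empty s, if_neg (by simp [PySem.Dict.contains_empty]), hzip]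
  rfl
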